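-- pv_equiv track=rewrite | github.com/anezuniga/grammar_truss_microstructure | scripts_generation/translate.py | get_edges_lattice
-- ===== SOURCE A (Python) =====
-- def get_edges_lattice(edges):
--     total = 8 # Total number of units in the lattice
--     edges_lattice = [[0] * (total * len(edges)) for _ in range(total * len(edges))]
--     for i in range(total):
--         for j in range(len(edges)):
--             for k in range(len(edges)):
--                 edges_lattice[i*len(edges)+j][i*len(edges)+k] = edges[j][k]
--     return edges_lattice
-- ===== SOURCE B (Python) =====
-- def get_edges_lattice(edges):
--     n = len(edges)
--     return [[edges[r % n][c % n] if r // n == c // n else 0 for c in range(8 * n)]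
--             for r in range(8 * n)]
-- ===== Notes on version B (the rewrite author's own statement) =====
-- stated objective: alternative
-- what changed: B computes every cell of the 8n x 8n result directly from its coordinates with the block-diagonal formula (edges[r%n][c%n] when r//n==c//n, else 0), instead of preallocating a zero matrix and index-filling the diagonal blocks with three nested loops.
import Mathlib
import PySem

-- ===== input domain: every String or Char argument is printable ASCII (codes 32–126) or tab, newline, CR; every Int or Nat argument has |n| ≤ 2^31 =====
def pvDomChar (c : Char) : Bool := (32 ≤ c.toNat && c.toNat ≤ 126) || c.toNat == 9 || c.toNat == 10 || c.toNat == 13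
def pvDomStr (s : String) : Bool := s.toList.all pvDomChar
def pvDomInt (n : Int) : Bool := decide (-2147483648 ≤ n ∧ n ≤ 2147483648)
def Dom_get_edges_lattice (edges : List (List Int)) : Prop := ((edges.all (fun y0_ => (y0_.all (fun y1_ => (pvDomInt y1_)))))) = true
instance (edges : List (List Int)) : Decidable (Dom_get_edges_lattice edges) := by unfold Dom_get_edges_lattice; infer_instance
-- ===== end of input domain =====

-- B computes every cell of the 8n x 8n result directly from its coordinates with the
-- block-diagonal formula (edges[r%n][c%n] when r//n = c//n, else 0), instead of A's
-- preallocated zero matrix filled block by block with three nested loops (objective: alternative).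

-- shared element access: Python's edges[x][y] (both A and B access with in-range Nat indices)
def pvElem (edges : List (List Int)) (j k : Nat) : Int :=
  (PySem.List.pyGet? ((PySem.List.pyGet? edges (j : Int)).getD []) (k : Int)).getD 0

-- ===== PORT A =====
def get_edges_lattice (edges : List (List Int)) : List (List Int) :=
  let total := 8
  let n := edges.length
  let edges_lattice := List.replicate (total * n) (List.replicate (total * n) (0 : Int))
  (List.range total).foldl (fun m i =>
    (List.range n).foldl (fun m j =>
      (List.range n).foldl (fun m k =>
        m.set (i * n + j) ((m.getD (i * n + j) []).set (i * n + k) (pvElem edges j k))) m) m)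
    edges_lattice

-- ===== PORT B =====
def get_edges_lattice_alt (edges : List (List Int)) : List (List Int) :=
  let n := edges.length
  (List.range (8 * n)).map (fun r =>
    (List.range (8 * n)).map (fun c =>
      if r / n = c / n then pvElem edges (r % n) (c % n) else 0))

-- ===== PRECONDITION & SPEC =====
-- Pre_ excludes exactly the ragged inputs where some row is shorter than len(edges):
-- there the Python A (and B alike) raises IndexError on the element access.
def Pre_get_edges_lattice (edges : List (List Int)) : Prop :=
  ∀ row ∈ edges, edges.length ≤ row.length
instance (edges : List (List Int)) : Decidable (Pre_get_edges_lattice edges) := by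
  unfold Pre_get_edges_lattice; infer_instance

def pvWitness_get_edges_lattice : List (List Int) := [[1, 2], [3, 4]]

def Spec_get_edges_lattice (edges : List (List Int)) (out : List (List Int)) : Prop :=
  out = get_edges_lattice_alt edges
instance (edges : List (List Int)) (out : List (List Int)) : Decidable (Spec_get_edges_lattice edges out) := by
  unfold Spec_get_edges_lattice; infer_instance

-- ===== CLAIM (what is proved, stated in full; the proofs are below) =====
def Claim_equal_get_edges_lattice : Prop := ∀ (edges : List (List Int)), Dom_get_edges_lattice edges → Pre_get_edges_lattice edges → Spec_get_edges_lattice edges (get_edges_lattice edges)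

-- ===== LEMMAS AND PROOFS =====

-- a fold that repeatedly rewrites row r of the matrix equals a single set of the folded row
lemma fold_set_row (r : Nat) (g : List Int → Nat → List Int)
    (m : List (List Int)) (ks : List Nat) (hr : r < m.length) :
    List.foldl (fun m k => m.set r (g (m.getD r []) k)) m ks
      = m.set r (List.foldl g (m.getD r []) ks) := by
  induction ks generalizing m with
  | nil => simp [List.getD, hr]
  | cons k ks ih =>
    simp only [List.foldl_cons]
    rw [ih _ (by simpa using hr)]
    simp [List.getD, hr, List.set_set]

-- filling positions b..b+n-1 of an all-zero row of length L
lemma row_fold (e : Nat → Int) (b : Nat) :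
    ∀ (n L : Nat), b + n ≤ L →
    List.foldl (fun row k => row.set (b + k) (e k)) (List.replicate L (0 : Int)) (List.range n)
      = List.replicate b (0 : Int) ++ (List.range n).map e ++ List.replicate (L - (b + n)) (0 : Int) := by
  intro n
  induction n with
  | zero =>
    intro L h
    simp only [List.range_zero, List.foldl_nil, List.map_nil, List.append_nil]
    rw [show L = b + (L - b) by omega, ← List.replicate_add]
    congr 1
    omega
  | succ n ih =>
    intro L h
    rw [List.range_succ, List.foldl_append, List.foldl_cons, List.foldl_nil, ih L (by omega)]
    rw [show L - (b + n) = 1 + (L - (b + (n+1))) by omega, List.replicate_add, List.replicate_one]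
    rw [List.append_assoc, List.append_assoc, List.set_append_right _ _ (by simp)]
    simp only [List.length_replicate, Nat.add_sub_cancel_left]
    rw [List.set_append_right _ _ (by simp), List.length_map, List.length_range, Nat.sub_self]
    simp [List.append_assoc]

-- the j-fold for one diagonal block, acting on 'done rows ++ still-all-zero rows'
lemma block_fold (edges : List (List Int)) (i : Nat) (hi : i < 8) :
    ∀ (m : Nat), m ≤ edges.length →
    ∀ (done : List (List Int)), done.length = i * edges.length →
    List.foldl (fun mm j =>
        (List.range edges.length).foldl (fun mm k =>
          mm.set (i * edges.length + j)
            ((mm.getD (i * edges.length + j) []).set (i * edges.length + k) (pvElem edges j k))) mm)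
      (done ++ List.replicate (8 * edges.length - done.length)
        (List.replicate (8 * edges.length) (0 : Int)))
      (List.range m)
      = done
        ++ (List.range m).map (fun j =>
            List.replicate (i * edges.length) (0 : Int)
              ++ (List.range edges.length).map (fun k => pvElem edges j k)
              ++ List.replicate ((7 - i) * edges.length) (0 : Int))
        ++ List.replicate (8 * edges.length - done.length - m)
            (List.replicate (8 * edges.length) (0 : Int)) := by
  intro m
  induction m with
  | zero => intro _ done hd; simp
  | succ m ih =>
    intro hm done hd
    set n := edges.length with hn
    rw [List.range_succ, List.foldl_append, List.foldl_cons, List.foldl_nil,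
        ih (by omega) done hd]
    have hidx : i * n + m < 8 * n := by nlinarith
    set rows := (List.range m).map (fun j =>
            List.replicate (i * n) (0 : Int)
              ++ (List.range n).map (fun k => pvElem edges j k)
              ++ List.replicate ((7 - i) * n) (0 : Int)) with hrows
    have hlen1 : (done ++ rows).length = i * n + m := by simp [hrows, hd]
    rw [List.append_assoc]
    have hlen : (done ++ (rows ++ List.replicate (8 * n - done.length - m)
            (List.replicate (8 * n) (0 : Int)))).length = 8 * n := by
      simp [hrows, hd]; omega
    rw [fold_set_row (i * n + m)
        (fun row k => row.set (i * n + k) (pvElem edges m k))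
        _ _ (by rw [hlen]; exact hidx)]
    have hget : (done ++ (rows ++ List.replicate (8 * n - done.length - m)
            (List.replicate (8 * n) (0 : Int)))).getD (i * n + m) []
        = List.replicate (8 * n) (0 : Int) := by
      rw [List.getD, List.getElem?_append_right (by omega),
          List.getElem?_append_right (by simp [hrows]; omega)]
      rw [List.getElem?_replicate]
      rw [if_pos (by simp [hrows]; omega)]
      simp
    rw [hget, row_fold _ _ _ _ (by nlinarith)]
    have hsuf : 8 * n - (i * n + n) = (7 - i) * n := by
      have h7 : (7 - i) * n = 7 * n - i * n := by rw [Nat.sub_mul]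
      omega
    rw [hsuf]
    rw [← List.append_assoc, List.set_append_right _ _ (by rw [hlen1]), hlen1, Nat.sub_self]
    rw [show (8 * n - done.length - m) = 1 + (8 * n - done.length - (m + 1)) by omega,
        List.replicate_add, List.replicate_one, List.cons_append, List.set_cons_zero]
    simp [hrows, List.append_assoc]

-- the outer i-fold: after t blocks the first t·n rows are the block rows, the rest are zero
lemma outer_fold (edges : List (List Int)) :
    ∀ (t : Nat), t ≤ 8 →
    List.foldl (fun m i =>
        (List.range edges.length).foldl (fun m j =>
          (List.range edges.length).foldl (fun m k =>
            m.set (i * edges.length + j)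
              ((m.getD (i * edges.length + j) []).set (i * edges.length + k) (pvElem edges j k))) m) m)
      (List.replicate (8 * edges.length) (List.replicate (8 * edges.length) (0 : Int)))
      (List.range t)
      = (List.range t).flatMap (fun i =>
          (List.range edges.length).map (fun j =>
            List.replicate (i * edges.length) (0 : Int)
              ++ (List.range edges.length).map (fun k => pvElem edges j k)
              ++ List.replicate ((7 - i) * edges.length) (0 : Int)))
        ++ List.replicate (8 * edges.length - t * edges.length)
            (List.replicate (8 * edges.length) (0 : Int)) := by
  intro t
  induction t with
  | zero => simp
  | succ t ih =>
    intro ht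
    rw [List.range_succ, List.foldl_append, List.foldl_cons, List.foldl_nil,
        List.flatMap_append, ih (by omega)]
    have hd : ((List.range t).flatMap (fun i =>
          (List.range edges.length).map (fun j =>
            List.replicate (i * edges.length) (0 : Int)
              ++ (List.range edges.length).map (fun k => pvElem edges j k)
              ++ List.replicate ((7 - i) * edges.length) (0 : Int)))).length = t * edges.length := by
      simp [List.length_flatMap, Nat.mul_comm]
    have hb := block_fold edges t (by omega) edges.length le_rfl _ hd
    rw [hd] at hb
    rw [show 8 * edges.length - t * edges.length
          = 8 * edges.length - ((List.range t).flatMap (fun i =>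
          (List.range edges.length).map (fun j =>
            List.replicate (i * edges.length) (0 : Int)
              ++ (List.range edges.length).map (fun k => pvElem edges j k)
              ++ List.replicate ((7 - i) * edges.length) (0 : Int)))).length from by rw [hd]] at hb ⊢
    rw [hb, hd]
    simp only [List.flatMap_cons, List.flatMap_nil, List.append_nil]
    rw [List.append_assoc, show 8 * edges.length - (t+1) * edges.length
        = 8 * edges.length - t * edges.length - edges.length from by rw [Nat.add_mul, one_mul]; omega]
    simp [List.append_assoc]

-- one diagonal-block row written as B's coordinate-formula row
lemma cell_row (n i j : Nat) (hn : 0 < n) (hi : i < 8) (hj : j < n) (e : Nat → Nat → Int) :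
    (List.range (8 * n)).map (fun c =>
        if (i * n + j) / n = c / n then e ((i * n + j) % n) (c % n) else 0)
      = List.replicate (i * n) (0 : Int) ++ (List.range n).map (fun k => e j k)
          ++ List.replicate ((7 - i) * n) (0 : Int) := by
  have hdiv : (i * n + j) / n = i := by
    rw [Nat.add_comm, Nat.add_mul_div_right _ _ hn, Nat.div_eq_of_lt hj, Nat.zero_add]
  have hmod : (i * n + j) % n = j := by
    rw [Nat.add_comm, Nat.add_mul_mod_self_right, Nat.mod_eq_of_lt hj]
  have e1 : n * i = i * n := Nat.mul_comm n i
  have e2 : (7 - i) * n = 7 * n - i * n := Nat.sub_mul 7 i n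
  have e3 : i * n ≤ 7 * n := Nat.mul_le_mul_right n (by omega)
  apply List.ext_getElem
  · simp only [List.length_map, List.length_range, List.length_append, List.length_replicate]
    omega
  · intro c h1 h2
    simp only [List.getElem_map, List.getElem_range]
    have hc : c < 8 * n := by simpa using h1
    rw [hdiv, hmod]
    by_cases hlo : c < i * n
    · have hne : ¬ i = c / n := by
        have : c / n < i := (Nat.div_lt_iff_lt_mul hn).2 (by omega)
        omega
      rw [if_neg hne,
          List.getElem_append_left (by simp only [List.length_append, List.length_replicate, List.length_map, List.length_range]; omega),
          List.getElem_append_left (by simp only [List.length_replicate]; omega),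
          List.getElem_replicate]
    · by_cases hhi : c < i * n + n
      · have hcd : c / n = i := Nat.div_eq_of_lt_le (by omega) (by rw [Nat.succ_mul]; omega)
        have hcm : c % n = c - i * n := by
          conv_lhs => rw [show c = (c - i * n) + i * n by omega]
          rw [Nat.add_mul_mod_self_right, Nat.mod_eq_of_lt (by omega)]
        rw [if_pos hcd.symm, hcm,
            List.getElem_append_left (by simp only [List.length_append, List.length_replicate, List.length_map, List.length_range]; omega),
            List.getElem_append_right (by simp only [List.length_replicate]; omega)]
        simp only [List.getElem_map, List.getElem_range, List.length_replicate]
      · have hne : ¬ i = c / n := by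
          have : i + 1 ≤ c / n := (Nat.le_div_iff_mul_le hn).2 (by rw [Nat.add_mul, Nat.one_mul]; omega)
          omega
        rw [if_neg hne,
            List.getElem_append_right (by simp only [List.length_append, List.length_replicate, List.length_map, List.length_range]; omega),
            List.getElem_replicate]

-- a flatMap of equal-shape mapped blocks is one map over the flat index range
lemma flatMap_as_map {α : Type} (g : Nat → Nat → α) (n : Nat) :
    ∀ (t : Nat),
    (List.range t).flatMap (fun i => (List.range n).map (g i))
      = (List.range (t * n)).map (fun r => g (r / n) (r % n)) := by
  intro t
  induction t with
  | zero => simp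
  | succ t ih =>
    rw [List.range_succ, List.flatMap_append, ih, List.flatMap_cons, List.flatMap_nil,
        List.append_nil, Nat.succ_mul, List.range_add, List.map_append, List.map_map]
    congr 1
    apply List.map_congr_left
    intro k hk
    have hk' : k < n := List.mem_range.1 hk
    have hn : 0 < n := by omega
    simp only [Function.comp]
    rw [Nat.add_comm (t * n) k, Nat.add_mul_div_right _ _ hn, Nat.div_eq_of_lt hk',
        Nat.zero_add, Nat.add_mul_mod_self_right, Nat.mod_eq_of_lt hk']

theorem ports_agree (edges : List (List Int)) :
    get_edges_lattice edges = get_edges_lattice_alt edges := by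
  simp only [get_edges_lattice, get_edges_lattice_alt]
  rw [outer_fold edges 8 le_rfl]
  simp only [Nat.sub_self, List.replicate_zero, List.append_nil]
  rw [show (List.range 8).flatMap (fun i =>
        (List.range edges.length).map (fun j =>
          List.replicate (i * edges.length) (0 : Int)
            ++ (List.range edges.length).map (fun k => pvElem edges j k)
            ++ List.replicate ((7 - i) * edges.length) (0 : Int)))
      = (List.range (8 * edges.length)).map (fun r =>
          List.replicate ((r / edges.length) * edges.length) (0 : Int)
            ++ (List.range edges.length).map (fun k => pvElem edges (r % edges.length) k)
            ++ List.replicate ((7 - r / edges.length) * edges.length) (0 : Int))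
      from flatMap_as_map (fun i j =>
          List.replicate (i * edges.length) (0 : Int)
            ++ (List.range edges.length).map (fun k => pvElem edges j k)
            ++ List.replicate ((7 - i) * edges.length) (0 : Int)) edges.length 8]
  apply List.map_congr_left
  intro r hr
  have hr' : r < 8 * edges.length := List.mem_range.1 hr
  have hn : 0 < edges.length := by by_contra h; omega
  have hi : r / edges.length < 8 := (Nat.div_lt_iff_lt_mul hn).2 (by rw [Nat.mul_comm]; omega)
  have hj : r % edges.length < edges.length := Nat.mod_lt _ hn
  have := cell_row edges.length (r / edges.length) (r % edges.length) hn hi hj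
      (fun j k => pvElem edges j k)
  rw [show r / edges.length * edges.length + r % edges.length = r from
      by rw [Nat.mul_comm]; exact Nat.div_add_mod r edges.length] at this
  exact this.symm

-- ===== VERDICT (by name: the statement is the Claim_ definition above) =====
theorem get_edges_lattice_spec : Claim_equal_get_edges_lattice := by
  intro edges _ hpre
  unfold Spec_get_edges_lattice
  exact ports_agree edges
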